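-- pv_equiv track=rewrite | github.com/andreas-koukorinis/example_nbs | analytics/comparison/postprocess_stats.py | get_numerical_dict_diffs
-- ===== SOURCE A (Python) =====
-- def get_numerical_dict_diffs(d1, d2):
--     """Get the difference d1-d2 for both keys.
--
--     If a key is missing it assumes zero
--
--     """
--     all_keys = set()
--     all_keys.update(set(d1))
--     all_keys.update(set(d2))
--
--     diffs = {}
--     for key in all_keys:
--         d1v = d1.get(key, 0)
--         d2v = d2.get(key, 0)
--
--         diffs[key] = d1v - d2v
--     return diffs
-- ===== SOURCE B (Python) =====
-- def get_numerical_dict_diffs(d1, d2):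
--     """Get the difference d1-d2 for both keys.
--
--     If a key is missing it assumes zero
--
--     """
--     result = dict(d1)
--     for k, v in d2.items():
--         result[k] = result.get(k, 0) - v
--     return result
-- ===== Notes on version B (the rewrite author's own statement) =====
-- stated objective: simpler
-- what changed: Instead of building the union of both key sets and then looking up each key in both dicts, B copies d1 and makes one pass over d2.items() subtracting in place, so the union set and the double .get pass disappear.
import Mathlib
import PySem

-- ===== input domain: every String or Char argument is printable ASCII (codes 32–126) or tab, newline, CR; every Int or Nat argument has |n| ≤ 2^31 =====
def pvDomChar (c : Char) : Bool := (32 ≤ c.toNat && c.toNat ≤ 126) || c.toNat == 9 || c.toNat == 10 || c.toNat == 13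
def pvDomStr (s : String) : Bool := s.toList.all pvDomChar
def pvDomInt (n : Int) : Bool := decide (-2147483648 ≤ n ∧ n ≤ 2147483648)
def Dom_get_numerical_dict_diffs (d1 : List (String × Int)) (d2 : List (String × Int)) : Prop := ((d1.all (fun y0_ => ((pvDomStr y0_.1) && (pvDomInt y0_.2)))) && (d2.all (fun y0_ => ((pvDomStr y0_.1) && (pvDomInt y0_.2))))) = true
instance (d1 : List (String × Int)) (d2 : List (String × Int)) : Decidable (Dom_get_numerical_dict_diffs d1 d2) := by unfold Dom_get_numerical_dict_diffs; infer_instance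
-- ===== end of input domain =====

-- B replaces A's union-of-key-sets pass (two .get lookups per key) by copying d1 and
-- subtracting d2 in one pass over d2.items(); same O(n+m) cost, simpler decomposition.


-- ===== PORT A =====
-- all_keys = set(); all_keys.update(set(d1)); all_keys.update(set(d2));
-- then one pass over the union with two .get lookups.  (Iterating a Python set has
-- hash order; the resulting dict's CONTENT does not depend on it, so the port uses
-- the Set's insertion order — dict outputs are compared ignoring order.)
def get_numerical_dict_diffs (d1 : List (String × Int)) (d2 : List (String × Int)) : List (String × Int) :=
  let dd1 := PySem.Dict.ofList d1
  let dd2 := PySem.Dict.ofList d2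
  let all_keys : PySem.Set String :=
    PySem.Set.update (PySem.Set.update PySem.Set.empty (PySem.Set.ofList dd1.keys))
      (PySem.Set.ofList dd2.keys)
  let diffs :=
    all_keys.foldl (fun acc key => acc.insert key (dd1.getD key 0 - dd2.getD key 0))
      PySem.Dict.empty
  diffs.items

-- ===== PORT B =====
-- result = dict(d1); for k, v in d2.items(): result[k] = result.get(k, 0) - v
def get_numerical_dict_diffs_alt (d1 : List (String × Int)) (d2 : List (String × Int)) : List (String × Int) :=
  let result := PySem.Dict.ofList d1
  let res := (PySem.Dict.ofList d2).items.foldl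
      (fun acc p => acc.insert p.1 (acc.getD p.1 0 - p.2)) result
  res.items

-- ===== PRECONDITION & SPEC =====
def Spec_get_numerical_dict_diffs (d1 : List (String × Int)) (d2 : List (String × Int)) (out : List (String × Int)) : Prop := out = get_numerical_dict_diffs_alt d1 d2
instance (d1 : List (String × Int)) (d2 : List (String × Int)) (out : List (String × Int)) : Decidable (Spec_get_numerical_dict_diffs d1 d2 out) := by unfold Spec_get_numerical_dict_diffs; infer_instance

-- ===== CLAIM (what is proved, stated in full; the proofs are below) =====
def Claim_equal_get_numerical_dict_diffs : Prop := ∀ (d1 : List (String × Int)) (d2 : List (String × Int)), Dom_get_numerical_dict_diffs d1 d2 → Spec_get_numerical_dict_diffs d1 d2 (get_numerical_dict_diffs d1 d2)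

-- ===== LEMMAS AND PROOFS =====

-- getD on a literal cons-dict, from get?_mk_cons
theorem pv_getD_mk_cons (k : String) (v : Int) (t : List (String × Int)) (x : String) (d0 : Int) :
    (PySem.Dict.mk ((k, v) :: t)).getD x d0
      = if k == x then v else (PySem.Dict.mk t).getD x d0 := by
  rw [PySem.Dict.getD_eq_get?_getD, PySem.Dict.get?_mk_cons, PySem.Dict.getD_eq_get?_getD]
  split <;> rfl

-- a dict whose key set misses x returns the default
theorem pv_getD_not_mem (d : PySem.Dict String Int) (x : String) (d0 : Int)
    (h : x ∉ d.keys) : d.getD x d0 = d0 := by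
  apply PySem.Dict.getD_of_not_contains
  cases hc : d.contains x with
  | false => rfl
  | true => exact absurd ((PySem.Dict.contains_iff_mem_keys d x).1 hc) h

-- Dict.contains agrees with Set.contains on the key list
theorem pv_contains_eq (d : PySem.Dict String Int) (x : String) :
    d.contains x = PySem.Set.contains d.keys x := by
  by_cases h : x ∈ d.keys
  · rw [(PySem.Dict.contains_iff_mem_keys d x).2 h, ((PySem.Set.contains_iff d.keys x).2 h)]
  · cases hc : d.contains x with
    | false =>
      cases hs : PySem.Set.contains d.keys x with
      | false => rfl
      | true => exact absurd ((PySem.Set.contains_iff d.keys x).1 hs) h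
    | true => exact absurd ((PySem.Dict.contains_iff_mem_keys d x).1 hc) h

-- A's loop: inserting pairwise-distinct fresh keys appends them in order
theorem pv_afold (ks : List String) (f : String → Int) (r : PySem.Dict String Int)
    (hfresh : ∀ k ∈ ks, r.contains k = false) (hnd : ks.Nodup) :
    (ks.foldl (fun acc key => acc.insert key (f key)) r).items
      = r.items ++ ks.map (fun k => (k, f k)) := by
  induction ks generalizing r with
  | nil => simp
  | cons k t ih =>
    have hk : r.contains k = false := hfresh k (List.mem_cons_self ..)
    have hstep : ∀ x ∈ t, (r.insert k (f k)).contains x = false := by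
      intro x hx
      rw [PySem.Dict.contains_insert]
      have hxk : x ≠ k := fun h => (List.nodup_cons.1 hnd).1 (h ▸ hx)
      simp [hxk, hfresh x (List.mem_cons_of_mem _ hx)]
    rw [List.foldl_cons, ih _ hstep (List.nodup_cons.1 hnd).2,
      PySem.Dict.items_insert_of_not_contains r (f k) hk]
    simp

-- B's loop: the subtract-in-place pass, characterised on the items list
theorem pv_bfold (ps : List (String × Int)) (r : PySem.Dict String Int)
    (hr : r.keys.Nodup) (hnd : (ps.map Prod.fst).Nodup) :
    (ps.foldl (fun acc p => acc.insert p.1 (acc.getD p.1 0 - p.2)) r).items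
      = r.items.map (fun q => (q.1, q.2 - (PySem.Dict.mk ps).getD q.1 0))
        ++ (ps.filter (fun p => !(r.contains p.1))).map (fun p => (p.1, 0 - p.2)) := by
  induction ps generalizing r with
  | nil =>
    simp only [List.foldl_nil, List.filter_nil, List.map_nil, List.append_nil]
    have : ∀ q ∈ r.items, (q.1, q.2 - (PySem.Dict.mk ([] : List (String × Int))).getD q.1 0) = q := by
      intro q _
      have : (PySem.Dict.mk ([] : List (String × Int))).getD q.1 0 = 0 :=
        PySem.Dict.getD_empty q.1 0
      rw [this, sub_zero]
    rw [List.map_congr_left this, List.map_id']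
  | cons p t ih =>
    obtain ⟨k, v⟩ := p
    have hkt : k ∉ t.map Prod.fst := (List.nodup_cons.1 hnd).1
    have hgt : (PySem.Dict.mk t).getD k 0 = 0 := by
      apply pv_getD_not_mem; exact hkt
    have hfilter : ∀ x ∈ t,
        ((r.insert k (r.getD k 0 - v)).contains x.1 = false) ↔ (r.contains x.1 = false) := by
      intro x hx
      have hxk : x.1 ≠ k := fun h => hkt (h ▸ List.mem_map_of_mem hx)
      rw [PySem.Dict.contains_insert]
      simp [hxk]
    have hfeq : t.filter (fun p => !((r.insert k (r.getD k 0 - v)).contains p.1))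
        = t.filter (fun p => !(r.contains p.1)) := by
      apply List.filter_congr
      intro x hx
      have := hfilter x hx
      cases h1 : (r.insert k (r.getD k 0 - v)).contains x.1 <;>
        cases h2 : r.contains x.1 <;> simp_all
    rw [List.foldl_cons, ih _ (PySem.Dict.nodup_keys_insert r k _ hr) (List.nodup_cons.1 hnd).2, hfeq]
    cases hc : r.contains k with
    | true =>
      rw [PySem.Dict.items_insert_of_contains r _ hc, List.map_map, List.filter_cons]
      have : (!r.contains (k, v).1) = false := by simp [hc]
      rw [this, if_neg (by simp)]
      congr 1
      apply List.map_congr_left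
      intro q hq
      obtain ⟨a, b⟩ := q
      by_cases hqk : a = k
      · subst hqk
        have hq2 : r.getD a 0 = b := PySem.Dict.getD_of_mem_items r hq hr 0
        simp [Function.comp, pv_getD_mk_cons, hgt, hq2]
      · simp [Function.comp, pv_getD_mk_cons, hqk, Ne.symm hqk]
    | false =>
      rw [PySem.Dict.items_insert_of_not_contains r _ hc,
        PySem.Dict.getD_of_not_contains r 0 hc, List.map_append, List.filter_cons]
      have : (!r.contains (k, v).1) = true := by simp [hc]
      rw [this, if_pos rfl]
      have hknr : k ∉ r.keys := fun h => by
        rw [(PySem.Dict.contains_iff_mem_keys r k).2 h] at hc; cases hc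
      have hmap : r.items.map (fun q => (q.1, q.2 - (PySem.Dict.mk t).getD q.1 0))
          = r.items.map (fun q => (q.1, q.2 - (PySem.Dict.mk ((k, v) :: t)).getD q.1 0)) := by
        apply List.map_congr_left
        intro q hq
        have hqk : q.1 ≠ k := fun h => hknr (h ▸ List.mem_map_of_mem hq)
        rw [pv_getD_mk_cons]
        simp [Ne.symm hqk]
      rw [← hmap]
      simp [hgt, sub_zero]

-- ===== VERDICT (by name: the statement is the Claim_ definition above) =====
theorem get_numerical_dict_diffs_spec : Claim_equal_get_numerical_dict_diffs := by
  intro d1 d2 _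
  unfold Spec_get_numerical_dict_diffs get_numerical_dict_diffs get_numerical_dict_diffs_alt
  set dd1 := PySem.Dict.ofList d1 with hdd1
  set dd2 := PySem.Dict.ofList d2 with hdd2
  have hk1 : dd1.keys.Nodup := PySem.Dict.nodup_keys_ofList d1
  have hk2 : dd2.keys.Nodup := PySem.Dict.nodup_keys_ofList d2
  -- normalise A's key set
  have hall : PySem.Set.update (PySem.Set.update PySem.Set.empty (PySem.Set.ofList dd1.keys))
      (PySem.Set.ofList dd2.keys)
      = dd1.keys ++ dd2.keys.filter (fun y => !(PySem.Set.contains dd1.keys y)) := by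
    rw [PySem.Set.update_empty, PySem.Set.ofList_ofList,
      PySem.Set.ofList_eq_self_of_nodup _ hk1,
      PySem.Set.update_eq_append_filter, PySem.Set.ofList_ofList,
      PySem.Set.ofList_eq_self_of_nodup _ hk2]
  simp only [hall]
  -- A's fold over fresh keys starting from the empty dict
  have hfresh : ∀ k ∈ dd1.keys ++ dd2.keys.filter (fun y => !(PySem.Set.contains dd1.keys y)),
      (PySem.Dict.empty : PySem.Dict String Int).contains k = false := by
    intro k _; exact PySem.Dict.contains_empty k
  have hnd : (dd1.keys ++ dd2.keys.filter (fun y => !(PySem.Set.contains dd1.keys y))).Nodup := by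
    refine List.Nodup.append hk1 (hk2.filter _) ?_
    intro x hx1 hx2
    have := (List.mem_filter.1 hx2).2
    rw [Bool.not_eq_eq_eq_not, Bool.not_true] at this
    rw [(PySem.Set.contains_iff dd1.keys x).2 hx1] at this
    cases this
  rw [pv_afold _ _ _ hfresh hnd, pv_bfold dd2.items dd1 hk1 (by exact hk2)]
  have hmk : PySem.Dict.mk dd2.items = dd2 := rfl
  rw [hmk]
  have hemp : (PySem.Dict.empty : PySem.Dict String Int).items = [] := rfl
  simp only [hemp, List.nil_append, List.map_append]
  congr 1
  · -- the d1 part: map over keys vs map over items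
    have hkeys : dd1.keys = dd1.items.map Prod.fst := rfl
    rw [hkeys, List.map_map]
    apply List.map_congr_left
    intro q hq
    have : dd1.getD q.1 0 = q.2 := PySem.Dict.getD_of_mem_items dd1 (by exact hq) hk1 0
    simp [Function.comp, this]
  · -- the d2-only part
    have hkeys : dd2.keys = dd2.items.map Prod.fst := rfl
    rw [hkeys, List.filter_map, List.map_map]
    have hpred : ∀ q ∈ dd2.items,
        ((fun y => !(PySem.Set.contains dd1.keys y)) ∘ Prod.fst) q
          = (fun p => !(dd1.contains p.1)) q := by
      intro q _; simp [Function.comp, pv_contains_eq]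
    rw [List.filter_congr hpred]
    apply List.map_congr_left
    intro q hq
    have hqmem := List.mem_filter.1 hq
    have hnc : dd1.contains q.1 = false := by
      have := hqmem.2; cases h : dd1.contains q.1 <;> simp_all
    have h1 : dd1.getD q.1 0 = 0 := PySem.Dict.getD_of_not_contains dd1 0 hnc
    have h2 : dd2.getD q.1 0 = q.2 :=
      PySem.Dict.getD_of_mem_items dd2 (by exact hqmem.1) hk2 0
    simp [Function.comp, h1, h2]
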